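-- pv_equiv track=rewrite | github.com/jeongkwangkyun/algorithm | Programmers/문자열 내림차순 배제하기.py | solution
-- ===== SOURCE A (Python) =====
-- def solution(s):
--     answer=''
--     s=list(s)
--     big=[]
--     small=[]
--     for i in s:
--         if 'a'<=i<='z':
--             small.append(i)
--         elif 'A'<=i<='Z':
--             big.append(i)
--     small.sort(reverse=True)
--
--     big.sort(reverse=True)
--
--
--     return ''.join(small)+''.join(big)
-- ===== SOURCE B (Python) =====
-- def solution(s):
--     counts = {}
--     for c in s:
--         counts[c] = counts.get(c, 0) + 1
--     out = []
--     for code in range(122, 96, -1):   # 'z' down to 'a'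
--         out += chr(code) * counts.get(chr(code), 0)
--     for code in range(90, 64, -1):    # 'Z' down to 'A'
--         out += chr(code) * counts.get(chr(code), 0)
--     return ''.join(out)
-- ===== Notes on version B (the rewrite author's own statement) =====
-- stated objective: faster
-- what changed: Replaces A's filter-into-two-lists plus two comparison sorts with a single counting pass over a dict and a 52-bucket emission in descending order ('z'..'a' then 'Z'..'A').
import Mathlib
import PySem

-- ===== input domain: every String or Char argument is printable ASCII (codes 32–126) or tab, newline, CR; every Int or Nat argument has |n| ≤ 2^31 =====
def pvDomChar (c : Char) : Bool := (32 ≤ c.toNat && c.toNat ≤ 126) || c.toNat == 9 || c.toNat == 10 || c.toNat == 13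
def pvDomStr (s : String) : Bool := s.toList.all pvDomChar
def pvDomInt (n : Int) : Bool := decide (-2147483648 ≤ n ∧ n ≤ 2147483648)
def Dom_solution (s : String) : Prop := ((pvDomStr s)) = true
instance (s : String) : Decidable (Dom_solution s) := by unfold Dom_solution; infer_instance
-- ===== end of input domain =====

-- B replaces A's two comparison sorts with a 52-bucket counting sort (count once, emit 'z'..'a' then 'Z'..'A'): objective = faster (O(n) vs O(n log n)).
-- Both ports build the result at the char-list level; the final string concatenation/join is ported as String.ofList of the concatenated char lists (exact).

-- ===== PORT A =====
def stepA (p : List Char × List Char) (i : Char) : List Char × List Char :=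
  if 'a' ≤ i ∧ i ≤ 'z' then (p.1 ++ [i], p.2)
  else if 'A' ≤ i ∧ i ≤ 'Z' then (p.1, p.2 ++ [i])
  else p

def solution (s : String) : String :=
  let sl := s.toList
  let r := sl.foldl stepA ([], [])
  let small := PySem.List.sorted r.1 (fun x => x) true
  let big := PySem.List.sorted r.2 (fun x => x) true
  String.ofList (small ++ big)

-- ===== PORT B =====
-- out += chr(code) * counts.get(chr(code), 0)
def emitChunk (counts : PySem.Dict Char Int) (acc : List Char) (code : Int) : List Char :=
  acc ++ List.replicate (counts.getD (Char.ofNat code.toNat) 0).toNat (Char.ofNat code.toNat)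

def solution_alt (s : String) : String :=
  let counts := s.toList.foldl (fun d c => d.insert c (d.getD c 0 + 1)) PySem.Dict.empty
  let out := (PySem.List.pyRange 122 96 (-1)).foldl (emitChunk counts) []
  let out := (PySem.List.pyRange 90 64 (-1)).foldl (emitChunk counts) out
  String.ofList out

-- ===== PRECONDITION & SPEC =====
def Spec_solution (s : String) (out : String) : Prop := out = solution_alt s
instance (s : String) (out : String) : Decidable (Spec_solution s out) := by unfold Spec_solution; infer_instance

-- ===== CLAIM (what is proved, stated in full; the proofs are below) =====
def Claim_equal_solution : Prop := ∀ (s : String), Dom_solution s → Spec_solution s (solution s)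

-- ===== LEMMAS AND PROOFS =====

-- A's loop predicates
def pLow (i : Char) : Bool := decide ('a' ≤ i ∧ i ≤ 'z')
def pBig (i : Char) : Bool := !pLow i && decide ('A' ≤ i ∧ i ≤ 'Z')

-- the two descending bucket orders B emits
def zsL : List Char := ['z','y','x','w','v','u','t','s','r','q','p','o','n','m','l','k','j','i','h','g','f','e','d','c','b','a']
def zsU : List Char := ['Z','Y','X','W','V','U','T','S','R','Q','P','O','N','M','L','K','J','I','H','G','F','E','D','C','B','A']

def emit (xs : List Char) (ks : List Char) : List Char :=
  ks.flatMap (fun k => List.replicate (xs.count k) k)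

lemma foldl_stepA (L : List Char) : ∀ sm bg : List Char,
    L.foldl stepA (sm, bg) = (sm ++ L.filter pLow, bg ++ L.filter pBig) := by
  induction L with
  | nil => intro sm bg; simp
  | cons i t ih =>
    intro sm bg
    by_cases h1 : 'a' ≤ i ∧ i ≤ 'z'
    · simp [stepA, h1, ih, pLow, pBig]
    · by_cases h2 : 'A' ≤ i ∧ i ≤ 'Z' <;>
        simp [stepA, h1, h2, ih, pLow, pBig]

lemma mem_emit {x : Char} {xs ks : List Char} (h : x ∈ emit xs ks) : x ∈ ks := by
  simp only [emit, List.mem_flatMap] at h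
  obtain ⟨k, hk, hx⟩ := h
  rwa [List.eq_of_mem_replicate hx]

lemma emit_count (xs : List Char) : ∀ ks : List Char, ks.Nodup → ∀ c : Char,
    (emit xs ks).count c = if c ∈ ks then xs.count c else 0 := by
  intro ks
  induction ks with
  | nil => intro _ c; simp [emit]
  | cons k t ih =>
    intro hnd c
    have hnd' := hnd.of_cons
    have hk : k ∉ t := (List.nodup_cons.mp hnd).1
    have iht := ih hnd' c
    unfold emit at iht ⊢
    simp only [List.flatMap_cons, List.count_append, List.count_replicate, iht]
    by_cases hc : c = k
    · subst hc
      simp [hk]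
    · simp [hc, Ne.symm hc]

lemma emit_perm (xs ks : List Char) (hnd : ks.Nodup) (hmem : ∀ x ∈ xs, x ∈ ks) :
    (emit xs ks).Perm xs := by
  rw [List.perm_iff_count]
  intro c
  rw [emit_count xs ks hnd c]
  by_cases hc : c ∈ ks
  · simp [hc]
  · simp only [hc, if_false]
    symm; rw [List.count_eq_zero]
    exact fun hx => hc (hmem c hx)

lemma emit_pairwise (xs : List Char) : ∀ ks : List Char, ks.Pairwise (· > ·) →
    (emit xs ks).Pairwise (fun a b => b ≤ a) := by
  intro ks
  induction ks with
  | nil => intro _; simp [emit]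
  | cons k t ih =>
    intro hp
    have hrest := ih hp.of_cons
    have hkt : ∀ b ∈ t, k > b := fun b hb => (List.pairwise_cons.mp hp).1 b hb
    show (List.replicate (xs.count k) k ++ emit xs t).Pairwise (fun a b => b ≤ a)
    rw [List.pairwise_append]
    refine ⟨(List.pairwise_replicate).mpr (Or.inr (le_refl k)), hrest, ?_⟩
    intro a ha b hb
    rw [List.eq_of_mem_replicate ha]
    exact le_of_lt (hkt b (mem_emit hb))

lemma sorted_rev_eq_emit (xs ks : List Char) (hp : ks.Pairwise (· > ·))
    (hmem : ∀ x ∈ xs, x ∈ ks) :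
    PySem.List.sorted xs (fun x => x) true = emit xs ks := by
  have hperm : (PySem.List.sorted xs (fun x => x) true).Perm (emit xs ks) :=
    (PySem.List.sorted_perm xs (fun x => x) true).trans (emit_perm xs ks hp.nodup hmem).symm
  have hs1 : (PySem.List.sorted xs (fun x => x) true).Pairwise (fun a b => b ≤ a) :=
    PySem.List.sorted_pairwise_rev (xs := xs) (key := fun x => x)
  exact hperm.eq_of_pairwise (fun a b _ _ h1 h2 => le_antisymm h2 h1) hs1 (emit_pairwise xs ks hp)

lemma emit_filter (xs : List Char) (p : Char → Bool) (ks : List Char)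
    (h : ∀ k ∈ ks, p k = true) : emit (xs.filter p) ks = emit xs ks := by
  unfold emit
  induction ks with
  | nil => rfl
  | cons k t ih =>
    simp only [List.flatMap_cons]
    rw [List.count_filter (h k (by simp)), ih (fun k hk => h k (by simp [hk]))]

lemma mem_zsL {x : Char} (h1 : 97 ≤ x.toNat) (h2 : x.toNat ≤ 122) : x ∈ zsL := by
  have hx : Char.ofNat x.toNat = x := Char.ofNat_toNat x
  generalize hg : x.toNat = n at h1 h2 hx
  interval_cases n <;> exact hx ▸ (by decide)

lemma mem_zsU {x : Char} (h1 : 65 ≤ x.toNat) (h2 : x.toNat ≤ 90) : x ∈ zsU := by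
  have hx : Char.ofNat x.toNat = x := Char.ofNat_toNat x
  generalize hg : x.toNat = n at h1 h2 hx
  interval_cases n <;> exact hx ▸ (by decide)

lemma char_le_toNat {a b : Char} (h : a ≤ b) : a.toNat ≤ b.toNat := by
  simpa [Char.le_def, UInt32.le_iff_toNat_le] using h

lemma low_mem_zsL {x : Char} (h : pLow x = true) : x ∈ zsL := by
  simp only [pLow, decide_eq_true_eq] at h
  exact mem_zsL (char_le_toNat h.1) (char_le_toNat h.2)

lemma big_mem_zsU {x : Char} (h : pBig x = true) : x ∈ zsU := by
  simp only [pBig, Bool.and_eq_true, decide_eq_true_eq] at h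
  exact mem_zsU (char_le_toNat h.2.1) (char_le_toNat h.2.2)

-- B's two emission loops compute 'emit' over the literal bucket lists
lemma foldl_emitChunk (L : List Char) (a b : Int) (init : List Char) :
    (PySem.List.pyRange a b (-1)).foldl
        (emitChunk (L.foldl (fun d c => d.insert c (d.getD c 0 + 1)) PySem.Dict.empty)) init
      = init ++ emit L ((PySem.List.pyRange a b (-1)).map (fun code => Char.ofNat code.toNat)) := by
  rw [PySem.Dict.foldl_insert_getD_add_one_eq_counter]
  unfold emitChunk emit
  rw [PySem.List.foldl_append_eq_flatMap, List.flatMap_map]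
  simp [PySem.Dict.getD_counter]

lemma rangeL_map : (PySem.List.pyRange 122 96 (-1)).map (fun code : Int => Char.ofNat code.toNat) = zsL := by
  decide

lemma rangeU_map : (PySem.List.pyRange 90 64 (-1)).map (fun code : Int => Char.ofNat code.toNat) = zsU := by
  decide

lemma all_low : ∀ k ∈ zsL, pLow k = true := by
  rw [← List.all_eq_true]; decide

lemma all_big : ∀ k ∈ zsU, pBig k = true := by
  rw [← List.all_eq_true]; decide

lemma pairwise_zsL : zsL.Pairwise (· > ·) := by decide

lemma pairwise_zsU : zsU.Pairwise (· > ·) := by decide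

-- ===== VERDICT (by name: the statement is the Claim_ definition above) =====
theorem solution_spec : Claim_equal_solution := by
  intro s _
  simp only [Spec_solution, solution, solution_alt]
  rw [foldl_stepA s.toList [] []]
  rw [foldl_emitChunk s.toList 122 96 [], foldl_emitChunk s.toList 90 64, rangeL_map, rangeU_map]
  simp only [List.nil_append]
  rw [sorted_rev_eq_emit (s.toList.filter pLow) zsL pairwise_zsL (fun x hx => low_mem_zsL (List.mem_filter.mp hx).2),
      sorted_rev_eq_emit (s.toList.filter pBig) zsU pairwise_zsU (fun x hx => big_mem_zsU (List.mem_filter.mp hx).2),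
      emit_filter s.toList pLow zsL all_low,
      emit_filter s.toList pBig zsU all_big]
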